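-- pv_equiv track=rewrite | github.com/vietnhprintway/vgflow | scripts/phase-metadata.py | infer_surfaces_from_paths
-- ===== SOURCE A (Python) =====
-- def infer_surfaces_from_paths(touched: list[str]) -> list[str]:
--     """Infer surfaces from touched_paths when SPECS doesn't declare."""
--     inferred = set()
--     for p in touched:
--         if p.startswith("apps/web"):
--             inferred.add("web")
--         elif p.startswith("apps/api"):
--             inferred.add("api")
--         elif p.startswith("apps/rtb-engine"):
--             inferred.add("rtb")
--         elif p.startswith("apps/workers"):
--             inferred.add("workers")
--         elif p.startswith("packages/"):
--             inferred.add("shared")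
--     return sorted(inferred)
-- ===== SOURCE B (Python) =====
-- # Rule-driven rewrite: iterate over (prefix, tag) rules and scan all paths per rule.
-- SURFACE_RULES = [
--     ("apps/web", "web"),
--     ("apps/api", "api"),
--     ("apps/rtb-engine", "rtb"),
--     ("apps/workers", "workers"),
--     ("packages/", "shared"),
-- ]
--
-- def infer_surfaces_from_paths(touched: list[str]) -> list[str]:
--     return sorted(tag for prefix, tag in SURFACE_RULES
--                   if any(p.startswith(prefix) for p in touched))
-- ===== Notes on version B (the rewrite author's own statement) =====
-- stated objective: alternative
-- what changed: Inverts the loop nesting: instead of classifying each path with an if/elif chain into a set, B iterates over a fixed (prefix, tag) rule table and keeps a tag iff any touched path starts with its prefix; exact because the five prefixes are mutually exclusive.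
import Mathlib
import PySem

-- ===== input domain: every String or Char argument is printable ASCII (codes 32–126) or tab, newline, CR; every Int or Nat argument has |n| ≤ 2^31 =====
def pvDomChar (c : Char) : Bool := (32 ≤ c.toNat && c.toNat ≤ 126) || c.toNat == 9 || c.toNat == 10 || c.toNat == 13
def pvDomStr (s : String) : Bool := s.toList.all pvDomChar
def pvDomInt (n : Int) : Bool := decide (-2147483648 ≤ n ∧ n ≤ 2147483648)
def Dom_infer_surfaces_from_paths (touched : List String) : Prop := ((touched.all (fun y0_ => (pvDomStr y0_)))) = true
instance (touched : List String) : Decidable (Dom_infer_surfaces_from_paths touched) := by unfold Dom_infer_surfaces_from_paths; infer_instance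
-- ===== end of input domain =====

-- B inverts the loop nesting (rule-table outer loop, any-scan over paths per rule) instead of A's per-path if/elif chain; alternative decomposition, same cost.
set_option maxHeartbeats 1000000


-- ===== PORT A =====
def inferStep (s : PySem.Set String) (p : String) : PySem.Set String :=
  if PySem.Str.startswith p "apps/web" then PySem.Set.add s "web"
  else if PySem.Str.startswith p "apps/api" then PySem.Set.add s "api"
  else if PySem.Str.startswith p "apps/rtb-engine" then PySem.Set.add s "rtb"
  else if PySem.Str.startswith p "apps/workers" then PySem.Set.add s "workers"
  else if PySem.Str.startswith p "packages/" then PySem.Set.add s "shared"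
  else s

def infer_surfaces_from_paths (touched : List String) : List String :=
  PySem.List.sorted (touched.foldl inferStep PySem.Set.empty) (fun x => x) false

-- ===== PORT B =====
def pvSurfaceRules : List (String × String) :=
  [("apps/web", "web"), ("apps/api", "api"), ("apps/rtb-engine", "rtb"),
   ("apps/workers", "workers"), ("packages/", "shared")]

def infer_surfaces_from_paths_alt (touched : List String) : List String :=
  PySem.List.sorted
    ((pvSurfaceRules.filter (fun r => touched.any (fun p => PySem.Str.startswith p r.1))).map
      Prod.snd)
    (fun x => x) false

-- ===== PRECONDITION & SPEC =====
def Spec_infer_surfaces_from_paths (touched : List String) (out : List String) : Prop := out = infer_surfaces_from_paths_alt touched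
instance (touched : List String) (out : List String) : Decidable (Spec_infer_surfaces_from_paths touched out) := by unfold Spec_infer_surfaces_from_paths; infer_instance

-- ===== CLAIM (what is proved, stated in full; the proofs are below) =====
def Claim_equal_infer_surfaces_from_paths : Prop := ∀ (touched : List String), Dom_infer_surfaces_from_paths touched → Spec_infer_surfaces_from_paths touched (infer_surfaces_from_paths touched)

-- ===== LEMMAS AND PROOFS =====

-- the five route prefixes are mutually exclusive (none is a prefix of another)
theorem sw_excl (p c1 c2 : String) (h12 : ¬ (c1.toList <+: c2.toList))
    (h21 : ¬ (c2.toList <+: c1.toList))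
    (h : PySem.Str.startswith p c1 = true) : PySem.Str.startswith p c2 = false := by
  rw [PySem.Str.startswith_eq, PySem.Chars.startswith_iff] at h
  rw [PySem.Str.startswith_eq]
  by_contra hc
  rw [Bool.not_eq_false, PySem.Chars.startswith_iff] at hc
  rcases List.prefix_or_prefix_of_prefix h hc with h' | h' <;> [exact h12 h'; exact h21 h']

theorem mem_fold_inferStep (touched : List String) (s : PySem.Set String) (x : String) :
    x ∈ touched.foldl inferStep s ↔ x ∈ s ∨
      (x = "web" ∧ touched.any (fun p => PySem.Str.startswith p "apps/web") = true) ∨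
      (x = "api" ∧ touched.any (fun p => PySem.Str.startswith p "apps/api") = true) ∨
      (x = "rtb" ∧ touched.any (fun p => PySem.Str.startswith p "apps/rtb-engine") = true) ∨
      (x = "workers" ∧ touched.any (fun p => PySem.Str.startswith p "apps/workers") = true) ∨
      (x = "shared" ∧ touched.any (fun p => PySem.Str.startswith p "packages/") = true) := by
  induction touched generalizing s with
  | nil => simp
  | cons p t ih =>
    rw [List.foldl_cons, ih]
    unfold inferStep
    simp only [List.any_cons, Bool.or_eq_true]
    split_ifs with h1 h2 h3 h4 h5
    · have e2 := sw_excl p _ "apps/api" (by decide) (by decide) h1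
      have e3 := sw_excl p _ "apps/rtb-engine" (by decide) (by decide) h1
      have e4 := sw_excl p _ "apps/workers" (by decide) (by decide) h1
      have e5 := sw_excl p _ "packages/" (by decide) (by decide) h1
      simp only [PySem.Set.mem_add, h1, e2, e3, e4, e5, Bool.false_eq_true, false_or, true_or,
        and_true]
      aesop
    · have e1 : PySem.Str.startswith p "apps/web" = false := by simpa using h1
      have e3 := sw_excl p _ "apps/rtb-engine" (by decide) (by decide) h2
      have e4 := sw_excl p _ "apps/workers" (by decide) (by decide) h2
      have e5 := sw_excl p _ "packages/" (by decide) (by decide) h2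
      simp only [PySem.Set.mem_add, h2, e1, e3, e4, e5, Bool.false_eq_true, false_or, true_or,
        and_true]
      aesop
    · have e1 : PySem.Str.startswith p "apps/web" = false := by simpa using h1
      have e2 : PySem.Str.startswith p "apps/api" = false := by simpa using h2
      have e4 := sw_excl p _ "apps/workers" (by decide) (by decide) h3
      have e5 := sw_excl p _ "packages/" (by decide) (by decide) h3
      simp only [PySem.Set.mem_add, h3, e1, e2, e4, e5, Bool.false_eq_true, false_or, true_or,
        and_true]
      aesop
    · have e1 : PySem.Str.startswith p "apps/web" = false := by simpa using h1
      have e2 : PySem.Str.startswith p "apps/api" = false := by simpa using h2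
      have e3 : PySem.Str.startswith p "apps/rtb-engine" = false := by simpa using h3
      have e5 := sw_excl p _ "packages/" (by decide) (by decide) h4
      simp only [PySem.Set.mem_add, h4, e1, e2, e3, e5, Bool.false_eq_true, false_or, true_or,
        and_true]
      aesop
    · have e1 : PySem.Str.startswith p "apps/web" = false := by simpa using h1
      have e2 : PySem.Str.startswith p "apps/api" = false := by simpa using h2
      have e3 : PySem.Str.startswith p "apps/rtb-engine" = false := by simpa using h3
      have e4 : PySem.Str.startswith p "apps/workers" = false := by simpa using h4
      simp only [PySem.Set.mem_add, h5, e1, e2, e3, e4, Bool.false_eq_true, false_or, true_or,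
        and_true]
      aesop
    · have e1 : PySem.Str.startswith p "apps/web" = false := by simpa using h1
      have e2 : PySem.Str.startswith p "apps/api" = false := by simpa using h2
      have e3 : PySem.Str.startswith p "apps/rtb-engine" = false := by simpa using h3
      have e4 : PySem.Str.startswith p "apps/workers" = false := by simpa using h4
      have e5 : PySem.Str.startswith p "packages/" = false := by simpa using h5
      simp only [e1, e2, e3, e4, e5, Bool.false_eq_true, false_or]

theorem nodup_fold_inferStep (touched : List String) (s : PySem.Set String)
    (hs : s.Nodup) : (touched.foldl inferStep s).Nodup := by
  induction touched generalizing s with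
  | nil => exact hs
  | cons p t ih =>
    refine ih _ ?_
    unfold inferStep
    split_ifs <;> first | exact PySem.Set.nodup_add _ _ hs | exact hs

-- ===== VERDICT (by name: the statement is the Claim_ definition above) =====
theorem infer_surfaces_from_paths_spec : Claim_equal_infer_surfaces_from_paths := by
  intro touched _
  unfold Spec_infer_surfaces_from_paths infer_surfaces_from_paths infer_surfaces_from_paths_alt
  refine PySem.List.sorted_eq_sorted_of_perm _ _ _ (fun a b h => h) ?_
  refine (List.perm_ext_iff_of_nodup ?_ ?_).2 ?_
  · exact nodup_fold_inferStep touched _ List.nodup_nil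
  · refine List.Nodup.sublist (List.Sublist.map Prod.snd List.filter_sublist) ?_
    decide
  · intro x
    rw [mem_fold_inferStep]
    simp [pvSurfaceRules, List.mem_filter]
    aesop
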